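-- pv_equiv track=rewrite | github.com/JanBenda123/Krypto-MFF | 04-CompressionOracle/oracrack.py | count_first_place_occurences
-- ===== SOURCE A (Python) =====
-- def count_first_place_occurences(round_results):
--     # Counts how many times each letter performed the best
--     round_results_firsts = [0]*len(alphabeth)
--     for rnd in round_results:
--         rnd = list(rnd)
--         min_encr_len = min(rnd)
--         for i, encr_length in enumerate(rnd):
--             round_results_firsts[i] += int(encr_length == min_encr_len)
--     candidates = list(zip(alphabeth,round_results_firsts))
--     candidates.sort(key = lambda x:x[1],reverse=True)
--     return candidates
--
-- alphabeth =  "ABCDEFGHIJKLMNOPQRSTUVWXYZ1234567890_}{" # maybe we'll get better results if we ommit characters which are likely not there. Who knows...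
-- ===== SOURCE B (Python) =====
-- alphabeth = "ABCDEFGHIJKLMNOPQRSTUVWXYZ1234567890_}{"
--
-- def count_first_place_occurences(round_results):
--     # Counts how many times each letter performed the best.
--     # Sparse tally: only the winning (minimum-length) positions of each round
--     # are recorded in a dict; the descending order is then produced by a
--     # counting sort -- emit letters bucket by bucket from the highest possible
--     # count (= number of rounds) down to 0 -- instead of a comparison sort.
--     # Correct because counts lie in 0..n_rounds and letters with equal count
--     # keep alphabet order, exactly what a stable descending sort produces.
--     wins = {}
--     n_rounds = 0
--     for rnd in round_results:
--         rnd = list(rnd)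
--         m = min(rnd)
--         n_rounds += 1
--         for i, v in enumerate(rnd):
--             if v == m:
--                 wins[i] = wins.get(i, 0) + 1
--     return [(ch, c)
--             for c in range(n_rounds, -1, -1)
--             for i, ch in enumerate(alphabeth)
--             if wins.get(i, 0) == c]
-- ===== Notes on version B (the rewrite author's own statement) =====
-- stated objective: alternative
-- what changed: B replaces A's fixed 39-slot add-0/1 tally and comparison sort by a sparse dict recording only each round's winning positions plus a counting sort that emits letters bucket by bucket from count n_rounds down to 0.
import Mathlib
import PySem

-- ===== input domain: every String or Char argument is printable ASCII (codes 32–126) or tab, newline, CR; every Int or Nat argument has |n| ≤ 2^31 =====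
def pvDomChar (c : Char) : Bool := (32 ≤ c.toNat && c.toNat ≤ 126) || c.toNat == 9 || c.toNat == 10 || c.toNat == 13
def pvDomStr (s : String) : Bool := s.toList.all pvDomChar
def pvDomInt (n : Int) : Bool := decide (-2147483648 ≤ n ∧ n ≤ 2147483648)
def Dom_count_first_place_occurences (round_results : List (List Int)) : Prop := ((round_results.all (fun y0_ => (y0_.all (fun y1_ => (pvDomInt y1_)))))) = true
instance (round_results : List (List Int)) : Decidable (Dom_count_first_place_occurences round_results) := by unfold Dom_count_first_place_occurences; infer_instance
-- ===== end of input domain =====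

-- B replaces A's fixed-slot 0/1 tally plus comparison sort by a sparse dict of winning positions and a counting sort (buckets emitted from the highest count down); alternative algorithm, similar cost.


-- module constant used by both programs
def pvAlphabeth : List Char := "ABCDEFGHIJKLMNOPQRSTUVWXYZ1234567890_}{".toList

-- ===== PORT A =====
-- inner loop body: round_results_firsts[i] += int(encr_length == min_encr_len)
def pvAStep (min_encr_len : Int) (acc2 : List Int) (p : Int × Int) : List Int :=
  acc2.set p.1.toNat (acc2.getD p.1.toNat 0 + (if p.2 = min_encr_len then 1 else 0))

-- one iteration of A's outer loop (min([]) raises ValueError in Python: none-case is excluded by Pre_)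
def pvARound (acc : List Int) (rnd : List Int) : List Int :=
  match PySem.List.min? rnd (fun x => x) with
  | none => acc
  | some min_encr_len => (PySem.List.enumerate rnd).foldl (pvAStep min_encr_len) acc

def count_first_place_occurences (round_results : List (List Int)) : List (String × Int) :=
  let round_results_firsts := round_results.foldl pvARound (List.replicate pvAlphabeth.length (0 : Int))
  let candidates := (pvAlphabeth.map (fun c => String.ofList [c])).zip round_results_firsts
  PySem.List.sorted candidates (fun x => x.2) true

-- ===== PORT B =====
-- inner loop body: if v == m: wins[i] = wins.get(i, 0) + 1
def pvBStep (m : Int) (wins : PySem.Dict Int Int) (p : Int × Int) : PySem.Dict Int Int :=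
  if p.2 = m then wins.insert p.1 (wins.getD p.1 0 + 1) else wins

-- one iteration of B's outer loop over (wins, n_rounds); min([]) raises in Python: none-case excluded by Pre_
def pvBRound (st : PySem.Dict Int Int × Int) (rnd : List Int) : PySem.Dict Int Int × Int :=
  match PySem.List.min? rnd (fun x => x) with
  | none => st
  | some m => ((PySem.List.enumerate rnd).foldl (pvBStep m) st.1, st.2 + 1)

def count_first_place_occurences_alt (round_results : List (List Int)) : List (String × Int) :=
  let st := round_results.foldl pvBRound ((PySem.Dict.mk [] : PySem.Dict Int Int), 0)
  (PySem.List.pyRange st.2 (-1) (-1)).flatMap (fun c =>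
    (PySem.List.enumerate pvAlphabeth).filterMap (fun p =>
      if st.1.getD p.1 0 = c then some (String.ofList [p.2], c) else none))

-- ===== PRECONDITION & SPEC =====
-- Pre_ excludes exactly the inputs where Python A raises: a round with no entries (Python min of an empty sequence raises ValueError)
-- or longer than the 39-letter alphabet (IndexError on round_results_firsts[i]).
def Pre_count_first_place_occurences (round_results : List (List Int)) : Prop :=
  ∀ rnd ∈ round_results, rnd ≠ [] ∧ rnd.length ≤ 39
instance (round_results : List (List Int)) : Decidable (Pre_count_first_place_occurences round_results) := by unfold Pre_count_first_place_occurences; infer_instance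
def pvWitness_count_first_place_occurences : List (List Int) := [[1, 2], [2, 1], [3, 3]]

def Spec_count_first_place_occurences (round_results : List (List Int)) (out : List (String × Int)) : Prop := out = count_first_place_occurences_alt round_results
instance (round_results : List (List Int)) (out : List (String × Int)) : Decidable (Spec_count_first_place_occurences round_results out) := by unfold Spec_count_first_place_occurences; infer_instance

-- ===== CLAIM (what is proved, stated in full; the proofs are below) =====
def Claim_equal_count_first_place_occurences : Prop := ∀ (round_results : List (List Int)), Dom_count_first_place_occurences round_results → Pre_count_first_place_occurences round_results → Spec_count_first_place_occurences round_results (count_first_place_occurences round_results)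
-- ===== LEMMAS AND PROOFS =====

-- number of first places taken at position i, over all rounds
def pvCntP (rr : List (List Int)) (i : Nat) : Int :=
  ((rr.countP (fun r => decide (i < r.length ∧ some (r.getD i 0) = PySem.List.min? r (fun x => x)))) : Int)

-- contribution of one round to slot j
def pvCnt (rnd : List Int) (m : Int) (s j : Nat) : Int :=
  if s ≤ j ∧ j - s < rnd.length ∧ rnd.getD (j - s) 0 = m then 1 else 0

theorem pvMinSome (r : List Int) (h : r ≠ []) : ∃ m, PySem.List.min? r (fun y => y) = some m := by
  cases r with
  | nil => exact absurd rfl h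
  | cons x t =>
    simp only [PySem.List.min?, List.foldl_cons]
    clear h
    induction t generalizing x with
    | nil => exact ⟨x, rfl⟩
    | cons y t ih =>
      simp only [List.foldl_cons]
      by_cases hxy : y < x
      · simpa [hxy] using ih y
      · simpa [hxy] using ih x

theorem pvInnerA (rnd : List Int) (m : Int) : ∀ (s : Nat) (acc : List Int),
    s + rnd.length ≤ acc.length →
    ((PySem.List.enumerate rnd (s : Int)).foldl (pvAStep m) acc).length = acc.length ∧
    ∀ j, ((PySem.List.enumerate rnd (s : Int)).foldl (pvAStep m) acc).getD j 0
         = acc.getD j 0 + pvCnt rnd m s j := by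
  induction rnd with
  | nil =>
    intro s acc h
    simp [PySem.List.enumerate, pvCnt]
  | cons x xs ih =>
    intro s acc h
    have h' : s + (xs.length + 1) ≤ acc.length := by simpa using h
    rw [PySem.List.enumerate_cons]
    have hs1 : ((s : Int) + 1) = ((s + 1 : Nat) : Int) := by push_cast; ring
    simp only [List.foldl_cons, hs1]
    have hacc' : (pvAStep m acc ((s : Int), x)).length = acc.length := by
      simp [pvAStep]
    have hlen : (s + 1) + xs.length ≤ (pvAStep m acc ((s : Int), x)).length := by
      rw [hacc']; omega
    obtain ⟨hl, hj⟩ := ih (s + 1) _ hlen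
    refine ⟨by rw [hl, hacc'], ?_⟩
    intro j
    rw [hj j]
    have hgd : (pvAStep m acc ((s : Int), x)).getD j 0
        = if j = s then acc.getD s 0 + (if x = m then 1 else 0) else acc.getD j 0 := by
      simp only [pvAStep, Int.toNat_natCast]
      by_cases hje : j = s
      · subst hje
        rw [List.getD_eq_getElem?_getD, List.getElem?_set_self (by omega)]
        simp
      · rw [List.getD_eq_getElem?_getD, List.getElem?_set_ne (by omega),
            ← List.getD_eq_getElem?_getD, if_neg hje]
    rw [hgd]
    by_cases hje : j = s
    · subst hje
      have h1 : pvCnt (x :: xs) m j j = (if x = m then 1 else 0) := by simp [pvCnt]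
      have h2 : pvCnt xs m (j + 1) j = 0 := by simp [pvCnt]
      rw [if_pos rfl, h1, h2]; ring
    · have hiff : (s ≤ j ∧ j - s < (x :: xs).length ∧ (x :: xs).getD (j - s) 0 = m)
          ↔ (s + 1 ≤ j ∧ j - (s + 1) < xs.length ∧ xs.getD (j - (s + 1)) 0 = m) := by
        constructor
        · rintro ⟨a, b, c⟩
          have hslt : s < j := lt_of_le_of_ne a (fun hh => hje hh.symm)
          have h1 : j - s = (j - (s + 1)) + 1 := by omega
          rw [h1, List.getD_cons_succ] at c
          simp only [List.length_cons] at b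
          exact ⟨by omega, by omega, c⟩
        · rintro ⟨a, b, c⟩
          have h1 : j - s = (j - (s + 1)) + 1 := by omega
          refine ⟨by omega, by simp only [List.length_cons]; omega, ?_⟩
          rw [h1, List.getD_cons_succ]; exact c
      have hcc : pvCnt (x :: xs) m s j = pvCnt xs m (s + 1) j := by
        simp only [pvCnt]; rw [if_congr hiff rfl rfl]
      rw [if_neg hje, hcc]

theorem pvOuterA (rs : List (List Int)) : ∀ (acc : List Int),
    (∀ r ∈ rs, r ≠ [] ∧ r.length ≤ acc.length) →
    (rs.foldl pvARound acc).length = acc.length ∧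
    ∀ j, (rs.foldl pvARound acc).getD j 0
         = acc.getD j 0 + ((rs.countP (fun r => decide (j < r.length ∧ some (r.getD j 0) = PySem.List.min? r (fun x => x)))) : Int) := by
  induction rs with
  | nil => intro acc _; simp
  | cons r rest ih =>
    intro acc h
    obtain ⟨hne, hle⟩ := h r (List.mem_cons_self)
    obtain ⟨m, hm⟩ := pvMinSome r hne
    simp only [List.foldl_cons]
    have hr : pvARound acc r = (PySem.List.enumerate r ((0 : Nat) : Int)).foldl (pvAStep m) acc := by
      simp [pvARound, hm]
    obtain ⟨hl1, hj1⟩ := pvInnerA r m 0 acc (by simpa using hle)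
    rw [hr]
    obtain ⟨hl2, hj2⟩ := ih ((PySem.List.enumerate r ((0 : Nat) : Int)).foldl (pvAStep m) acc)
      (by intro r' hr'; rw [hl1]; exact h r' (List.mem_cons_of_mem _ hr'))
    refine ⟨by rw [hl2, hl1], ?_⟩
    intro j
    rw [hj2 j, hj1 j, List.countP_cons]
    have hp : pvCnt r m 0 j
        = if (decide (j < r.length ∧ some (r.getD j 0) = PySem.List.min? r (fun x => x)) = true) then (1 : Int) else 0 := by
      simp [pvCnt, hm]
    rw [hp]
    push_cast
    split_ifs <;> ring

theorem pvFirstsEq (rr : List (List Int)) (hpre : ∀ r ∈ rr, r ≠ [] ∧ r.length ≤ 39) :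
    rr.foldl pvARound (List.replicate 39 (0 : Int))
    = (List.range 39).map (fun i => pvCntP rr i) := by
  obtain ⟨hl, hj⟩ := pvOuterA rr (List.replicate 39 0) (by simpa using hpre)
  apply List.ext_getElem
  · simp only [List.length_map, List.length_range, hl, List.length_replicate]
  · intro i h1 h2
    have hv := hj i
    rw [List.getD_eq_getElem _ _ h1, List.getD_replicate] at hv
    rw [hv]
    simp only [List.getElem_map, List.getElem_range, pvCntP, zero_add]
    rw [hl] at h1
    simpa using h1

-- B's inner dict loop adds pvCnt to every key
theorem pvInnerB (rnd : List Int) (m : Int) : ∀ (s : Nat) (d : PySem.Dict Int Int) (j : Nat),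
    ((PySem.List.enumerate rnd (s : Int)).foldl (pvBStep m) d).getD (j : Int) 0
      = d.getD (j : Int) 0 + pvCnt rnd m s j := by
  induction rnd with
  | nil => intro s d j; simp [PySem.List.enumerate, pvCnt]
  | cons x xs ih =>
    intro s d j
    rw [PySem.List.enumerate_cons]
    have hs1 : ((s : Int) + 1) = ((s + 1 : Nat) : Int) := by push_cast; ring
    simp only [List.foldl_cons, hs1]
    rw [ih (s + 1) _ j]
    have hgd : (pvBStep m d ((s : Int), x)).getD (j : Int) 0
        = if j = s then d.getD (s : Int) 0 + (if x = m then 1 else 0) else d.getD (j : Int) 0 := by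
      simp only [pvBStep]
      by_cases hxm : x = m
      · rw [if_pos hxm]
        rw [PySem.Dict.getD_insert]
        by_cases hje : j = s
        · subst hje; simp [hxm]
        · have : ((j : Int) = (s : Int)) ↔ False := by
            constructor
            · intro hh; exact hje (by exact_mod_cast hh)
            · exact False.elim
          simp [this, hje]
      · rw [if_neg hxm]
        by_cases hje : j = s
        · subst hje; simp [hxm]
        · simp [hje]
    rw [hgd]
    by_cases hje : j = s
    · subst hje
      have h1 : pvCnt (x :: xs) m j j = (if x = m then 1 else 0) := by simp [pvCnt]
      have h2 : pvCnt xs m (j + 1) j = 0 := by simp [pvCnt]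
      rw [if_pos rfl, h1, h2]; ring
    · have hiff : (s ≤ j ∧ j - s < (x :: xs).length ∧ (x :: xs).getD (j - s) 0 = m)
          ↔ (s + 1 ≤ j ∧ j - (s + 1) < xs.length ∧ xs.getD (j - (s + 1)) 0 = m) := by
        constructor
        · rintro ⟨a, b, c⟩
          have hslt : s < j := lt_of_le_of_ne a (fun hh => hje hh.symm)
          have h1 : j - s = (j - (s + 1)) + 1 := by omega
          rw [h1, List.getD_cons_succ] at c
          simp only [List.length_cons] at b
          exact ⟨by omega, by omega, c⟩
        · rintro ⟨a, b, c⟩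
          have h1 : j - s = (j - (s + 1)) + 1 := by omega
          refine ⟨by omega, by simp only [List.length_cons]; omega, ?_⟩
          rw [h1, List.getD_cons_succ]; exact c
      have hcc : pvCnt (x :: xs) m s j = pvCnt xs m (s + 1) j := by
        simp only [pvCnt]; rw [if_congr hiff rfl rfl]
      rw [if_neg hje, hcc]

theorem pvOuterB (rs : List (List Int)) : ∀ (st : PySem.Dict Int Int × Int),
    (∀ r ∈ rs, r ≠ []) →
    (rs.foldl pvBRound st).2 = st.2 + rs.length ∧
    ∀ j : Nat, (rs.foldl pvBRound st).1.getD (j : Int) 0 = st.1.getD (j : Int) 0 + pvCntP rs j := by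
  induction rs with
  | nil => intro st _; simp [pvCntP]
  | cons r rest ih =>
    intro st h
    have hne := h r (List.mem_cons_self)
    obtain ⟨m, hm⟩ := pvMinSome r hne
    simp only [List.foldl_cons]
    have hr : pvBRound st r = ((PySem.List.enumerate r ((0 : Nat) : Int)).foldl (pvBStep m) st.1, st.2 + 1) := by
      simp [pvBRound, hm]
    rw [hr]
    obtain ⟨hl2, hj2⟩ := ih _ (fun r' hr' => h r' (List.mem_cons_of_mem _ hr'))
    constructor
    · rw [hl2]; simp; ring
    · intro j
      rw [hj2 j]
      rw [pvInnerB r m 0 st.1 j]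
      simp only [pvCntP, List.countP_cons]
      have hp : pvCnt r m 0 j
          = if (decide (j < r.length ∧ some (r.getD j 0) = PySem.List.min? r (fun x => x)) = true) then (1 : Int) else 0 := by
        simp [pvCnt, hm]
      rw [hp]
      push_cast
      split_ifs <;> ring

-- the nested comprehension's inner pass = map-then-filter
theorem pvFilterMapEq (w : Int → Int) (c : Int) : ∀ (l : List Char) (s : Int),
    (PySem.List.enumerate l s).filterMap
        (fun p => if w p.1 = c then some (String.ofList [p.2], c) else none)
      = ((PySem.List.enumerate l s).map (fun p => (String.ofList [p.2], w p.1))).filter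
          (fun q => decide (q.2 = c)) := by
  intro l
  induction l with
  | nil => intro s; simp [PySem.List.enumerate]
  | cons x xs ih =>
    intro s
    rw [PySem.List.enumerate_cons]
    simp only [List.filterMap_cons, List.map_cons, List.filter_cons]
    by_cases hc : w s = c
    · simp [hc, ih]
    · simp [hc, ih]

-- the enumerated alphabet with dict lookups = A's zip of letters with the counts list
theorem pvMapEnumZip (w : Int → Int) (l : List Char) :
    (PySem.List.enumerate l (0 : Int)).map (fun p => (String.ofList [p.2], w p.1))
      = (l.map (fun ch => String.ofList [ch])).zip ((List.range l.length).map (fun k => w (Int.ofNat k))) := by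
  apply List.ext_getElem
  · simp [PySem.List.length_enumerate]
  · intro i h1 h2
    rw [List.getElem_map, PySem.List.getElem_enumerate, List.getElem_zip, List.getElem_map,
        List.getElem_map, List.getElem_range]
    simp

-- insertBy slides past a prefix it does not go before
theorem pvInsertThrough {α : Type} (bf : α → α → Bool) (x : α) :
    ∀ (pre post : List α), (∀ y ∈ pre, bf x y = false) →
      PySem.List.insertBy bf x (pre ++ post) = pre ++ PySem.List.insertBy bf x post := by
  intro pre
  induction pre with
  | nil => intro post _; simp
  | cons y pre ih =>
    intro post h
    have hy : bf x y = false := h y (List.mem_cons_self)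
    simp only [List.cons_append, PySem.List.insertBy, hy]
    simp only [Bool.false_eq_true, if_false]
    rw [ih post (fun z hz => h z (List.mem_cons_of_mem _ hz))]

theorem pvInsertFront {α : Type} (bf : α → α → Bool) (x : α) (l : List α)
    (h : ∀ y ∈ l, bf x y = true) : PySem.List.insertBy bf x l = x :: l := by
  cases l with
  | nil => rfl
  | cons y ys => simp [PySem.List.insertBy, h y (List.mem_cons_self)]

-- appending an element whose key is not in ks leaves the ks-buckets unchanged
theorem pvFlatMapFilterAppend (l : List (String × Int)) (x : String × Int) :
    ∀ (ks : List Int), (∀ c ∈ ks, x.2 ≠ c) →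
      ks.flatMap (fun c => (l ++ [x]).filter (fun q => decide (q.2 = c)))
        = ks.flatMap (fun c => l.filter (fun q => decide (q.2 = c))) := by
  intro ks
  induction ks with
  | nil => intro _; rfl
  | cons k ks ih =>
    intro h
    simp only [List.flatMap_cons]
    rw [ih (fun c hc => h c (List.mem_cons_of_mem _ hc)), List.filter_append]
    have : List.filter (fun q => decide (q.2 = k)) [x] = [] := by
      simp [List.filter, h k (List.mem_cons_self)]
    rw [this, List.append_nil]

-- inserting x into the bucket decomposition appends x to its own bucket
theorem pvInsertBucket (l : List (String × Int)) (x : String × Int) :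
    ∀ (ks : List Int), ks.Pairwise (fun a b => b < a) → x.2 ∈ ks →
      PySem.List.insertBy (fun a b => decide (b.2 < a.2)) x
          (ks.flatMap (fun c => l.filter (fun q => decide (q.2 = c))))
        = ks.flatMap (fun c => (l ++ [x]).filter (fun q => decide (q.2 = c))) := by
  intro ks
  induction ks with
  | nil => intro _ hm; exact absurd hm (List.not_mem_nil)
  | cons k ks ih =>
    intro hpw hm
    have hks : ∀ c ∈ ks, c < k := fun c hc => (List.pairwise_cons.mp hpw).1 c hc
    have hpw' := (List.pairwise_cons.mp hpw).2
    simp only [List.flatMap_cons]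
    by_cases hx : x.2 = k
    · -- x belongs to the k-bucket: slide past it, land at the head of the rest
      have hpre : ∀ y ∈ l.filter (fun q => decide (q.2 = k)), (decide (y.2 < x.2) : Bool) = false := by
        intro y hy
        have : y.2 = k := by simpa using (List.of_mem_filter hy)
        simp [this, hx]
      rw [pvInsertThrough _ _ _ _ hpre]
      have hrest : ∀ y ∈ ks.flatMap (fun c => l.filter (fun q => decide (q.2 = c))),
          (decide (y.2 < x.2) : Bool) = true := by
        intro y hy
        obtain ⟨c, hc, hyc⟩ := List.mem_flatMap.mp hy
        have : y.2 = c := by simpa using (List.of_mem_filter hyc)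
        simp [this, hx]
        exact hks c hc
      rw [pvInsertFront _ _ _ hrest]
      rw [pvFlatMapFilterAppend l x ks (fun c hc => by rw [hx]; exact ne_of_gt (hks c hc))]
      have hfx : List.filter (fun q => decide (q.2 = k)) [x] = [x] := by simp [List.filter, hx]
      rw [List.filter_append, hfx]
      simp
    · -- x belongs to a later bucket: slide past the whole k-bucket and recurse
      have hxm : x.2 ∈ ks := by
        rcases List.mem_cons.mp hm with h1 | h1
        · exact absurd h1 hx
        · exact h1
      have hxlt : x.2 < k := hks _ hxm
      have hpre : ∀ y ∈ l.filter (fun q => decide (q.2 = k)), (decide (y.2 < x.2) : Bool) = false := by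
        intro y hy
        have : y.2 = k := by simpa using (List.of_mem_filter hy)
        simp [this]
        omega
      rw [pvInsertThrough _ _ _ _ hpre, ih hpw' hxm]
      have hfx : List.filter (fun q => decide (q.2 = k)) [x] = [] := by simp [List.filter, hx]
      rw [List.filter_append, hfx, List.append_nil]

-- a stable descending sort of keys drawn from a strictly decreasing key list IS the bucket concatenation
theorem pvSortedBucketsGen (ks : List Int) (hpw : ks.Pairwise (fun a b => b < a)) :
    ∀ (l : List (String × Int)), (∀ p ∈ l, p.2 ∈ ks) →
      PySem.List.sorted l (fun x => x.2) true
        = ks.flatMap (fun c => l.filter (fun q => decide (q.2 = c))) := by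
  intro l
  induction l using List.reverseRecOn with
  | nil =>
    intro _
    have h0 : PySem.List.sorted ([] : List (String × Int)) (fun x => x.2) true = [] :=
      (PySem.List.sorted_eq_nil_iff _ _ _).mpr rfl
    rw [h0]
    induction ks with
    | nil => rfl
    | cons k t iht => simp
  | append_singleton l x ih =>
    intro h
    rw [PySem.List.sorted_rev_eq_foldl_insertBy, List.foldl_append, List.foldl_cons, List.foldl_nil,
        ← PySem.List.sorted_rev_eq_foldl_insertBy,
        ih (fun p hp => h p (List.mem_append_left _ hp))]
    exact pvInsertBucket l x ks hpw (h x (List.mem_append_right _ (List.mem_cons_self)))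

theorem pvPairwiseCountdown (n : Int) :
    (PySem.List.pyRange n (-1) (-1)).Pairwise (fun a b => b < a) := by
  rw [PySem.List.pyRange_neg_one]
  exact List.Pairwise.map _ (fun a b hab => by omega) List.pairwise_lt_range

-- ===== VERDICT (by name: the statement is the Claim_ definition above) =====
theorem count_first_place_occurences_spec : Claim_equal_count_first_place_occurences := by
  intro rr _ hpre
  unfold Spec_count_first_place_occurences
  simp only [count_first_place_occurences, count_first_place_occurences_alt]
  have hal : pvAlphabeth.length = 39 := rfl
  rw [hal, pvFirstsEq rr hpre]
  obtain ⟨hn, hd⟩ := pvOuterB rr ((PySem.Dict.mk [] : PySem.Dict Int Int), 0)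
    (fun r hr => (hpre r hr).1)
  set st := rr.foldl pvBRound ((PySem.Dict.mk [] : PySem.Dict Int Int), 0) with hst
  have hdj : ∀ j : Nat, st.1.getD (j : Int) 0 = pvCntP rr j := by
    intro j
    rw [hd j]
    simp [PySem.Dict.getD, PySem.Dict.get?]
  have hflat : ∀ c : Int,
      (PySem.List.enumerate pvAlphabeth).filterMap
          (fun p => if st.1.getD p.1 0 = c then some (String.ofList [p.2], c) else none)
        = ((pvAlphabeth.map (fun ch => String.ofList [ch])).zip
            ((List.range 39).map (fun i => pvCntP rr i))).filter (fun q => decide (q.2 = c)) := by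
    intro c
    rw [pvFilterMapEq (fun i => st.1.getD i 0) c pvAlphabeth 0,
        pvMapEnumZip (fun i => st.1.getD i 0) pvAlphabeth, hal]
    have hmc : (List.range 39).map (fun k => st.1.getD (Int.ofNat k) 0)
        = (List.range 39).map (fun i => pvCntP rr i) :=
      List.map_congr_left (fun k _ => by simpa using hdj k)
    rw [hmc]
  simp only [hflat]
  apply pvSortedBucketsGen _ (pvPairwiseCountdown st.2)
  rintro ⟨a, b⟩ hp
  obtain ⟨hp1, hp2⟩ := List.of_mem_zip hp
  obtain ⟨i, hi, hpi⟩ := List.mem_map.mp hp2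
  rw [PySem.List.mem_pyRange_neg_one]
  simp only at hpi ⊢
  rw [← hpi]
  constructor
  · simp [pvCntP]; omega
  · rw [hn]
    have : rr.countP (fun r => decide (i < r.length ∧ some (r.getD i 0) = PySem.List.min? r (fun x => x))) ≤ rr.length := List.countP_le_length
    simp only [pvCntP]
    omega
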